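-- pv_equiv track=rewrite | github.com/windtara0619/tpu-inference | tools/kernel/tuner/v1/rpa_v3_kernel_tuner.py | get_decode_heavy_example
-- ===== SOURCE A (Python) =====
-- def get_decode_heavy_example(max_num_tokens, max_model_len, actual_num_seqs):
--     """Returns a decode-heavy example: N-1 decode sequences, 1 prefill sequence."""
--     assert max_num_tokens >= actual_num_seqs
--     decode_end = actual_num_seqs - 1
--     if actual_num_seqs == 1:
--         cu_q_lens = [0, max_num_tokens]
--     else:
--         cu_q_lens = list(range(actual_num_seqs))
--         prefill_q_len = max_num_tokens - (actual_num_seqs - 1)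
--         cu_q_lens.append(cu_q_lens[-1] + prefill_q_len)
--     kv_lens = []
--     for i in range(actual_num_seqs):
--         q_len = cu_q_lens[i + 1] - cu_q_lens[i]
--         if q_len == 1:
--             kv_lens.append(max_model_len)
--         else:
--             kv_lens.append(q_len)
--     return cu_q_lens, kv_lens, decode_end
-- ===== SOURCE B (Python) =====
-- def get_decode_heavy_example(max_num_tokens, max_model_len, actual_num_seqs):
--     """Returns a decode-heavy example: N-1 decode sequences, 1 prefill sequence.
--
--     Closed-form construction: no n==1 special case and no differencing loop over
--     cu_q_lens -- each output list is built directly."""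
--     assert max_num_tokens >= actual_num_seqs
--     prefill_q_len = max_num_tokens - (actual_num_seqs - 1)
--     cu_q_lens = list(range(actual_num_seqs)) + [max_num_tokens]
--     kv_lens = [max_model_len] * (actual_num_seqs - 1) + [
--         max_model_len if prefill_q_len == 1 else prefill_q_len
--     ]
--     return cu_q_lens, kv_lens, actual_num_seqs - 1
-- ===== Notes on version B (the rewrite author's own statement) =====
-- stated objective: simpler
-- what changed: B builds cu_q_lens and kv_lens in closed form (range(n)+[max_num_tokens] and [max_model_len]*(n-1)+[last]) instead of A's n==1 branch plus a differencing loop over cu_q_lens.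
import Mathlib
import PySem

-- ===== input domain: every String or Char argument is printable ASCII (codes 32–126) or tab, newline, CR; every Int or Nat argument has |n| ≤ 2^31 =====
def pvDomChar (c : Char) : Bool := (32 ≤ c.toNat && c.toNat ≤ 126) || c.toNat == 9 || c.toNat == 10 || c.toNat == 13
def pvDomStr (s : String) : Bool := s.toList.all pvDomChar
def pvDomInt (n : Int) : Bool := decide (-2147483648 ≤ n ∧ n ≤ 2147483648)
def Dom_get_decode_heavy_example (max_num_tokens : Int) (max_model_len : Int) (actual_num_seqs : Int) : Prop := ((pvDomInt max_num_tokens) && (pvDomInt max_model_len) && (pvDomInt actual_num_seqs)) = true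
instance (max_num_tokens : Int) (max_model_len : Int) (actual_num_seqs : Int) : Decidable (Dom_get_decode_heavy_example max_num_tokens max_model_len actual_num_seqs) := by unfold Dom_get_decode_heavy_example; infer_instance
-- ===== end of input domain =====

-- B replaces A's n==1 branch and differencing loop by a closed-form construction of both lists (objective: simpler).

-- ===== PORT A =====
def get_decode_heavy_example (max_num_tokens : Int) (max_model_len : Int) (actual_num_seqs : Int) : List Int × List Int × Int :=
  let decode_end := actual_num_seqs - 1
  let cu_q_lens : List Int :=
    if actual_num_seqs = 1 then [0, max_num_tokens]
    else
      let cu := PySem.List.pyRange 0 actual_num_seqs 1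
      let prefill_q_len := max_num_tokens - (actual_num_seqs - 1)
      cu ++ [PySem.List.pyGetD cu (-1) 0 + prefill_q_len]
  let kv_lens := (PySem.List.pyRange 0 actual_num_seqs 1).foldl (fun acc i =>
    let q_len := PySem.List.pyGetD cu_q_lens (i + 1) 0 - PySem.List.pyGetD cu_q_lens i 0
    if q_len = 1 then acc ++ [max_model_len] else acc ++ [q_len]) []
  (cu_q_lens, kv_lens, decode_end)

-- ===== PORT B =====
def get_decode_heavy_example_alt (max_num_tokens : Int) (max_model_len : Int) (actual_num_seqs : Int) : List Int × List Int × Int :=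
  let prefill_q_len := max_num_tokens - (actual_num_seqs - 1)
  (PySem.List.pyRange 0 actual_num_seqs 1 ++ [max_num_tokens],
   PySem.List.pyRepeat [max_model_len] (actual_num_seqs - 1) ++
     [if prefill_q_len = 1 then max_model_len else prefill_q_len],
   actual_num_seqs - 1)

-- ===== PRECONDITION & SPEC =====
-- Pre_ excludes exactly the inputs where A raises: AssertionError when max_num_tokens < actual_num_seqs,
-- IndexError (cu_q_lens[-1] on an empty list) when actual_num_seqs <= 0.
def Pre_get_decode_heavy_example (max_num_tokens : Int) (max_model_len : Int) (actual_num_seqs : Int) : Prop :=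
  1 ≤ actual_num_seqs ∧ actual_num_seqs ≤ max_num_tokens
instance (max_num_tokens : Int) (max_model_len : Int) (actual_num_seqs : Int) : Decidable (Pre_get_decode_heavy_example max_num_tokens max_model_len actual_num_seqs) := by unfold Pre_get_decode_heavy_example; infer_instance
def pvWitness_get_decode_heavy_example : Int × Int × Int := (5, 100, 3)
def Spec_get_decode_heavy_example (max_num_tokens : Int) (max_model_len : Int) (actual_num_seqs : Int) (out : List Int × List Int × Int) : Prop := out = get_decode_heavy_example_alt max_num_tokens max_model_len actual_num_seqs
instance (max_num_tokens : Int) (max_model_len : Int) (actual_num_seqs : Int) (out : List Int × List Int × Int) : Decidable (Spec_get_decode_heavy_example max_num_tokens max_model_len actual_num_seqs out) := by unfold Spec_get_decode_heavy_example; infer_instance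

-- ===== CLAIM (what is proved, stated in full; the proofs are below) =====
def Claim_equal_get_decode_heavy_example : Prop := ∀ (max_num_tokens : Int) (max_model_len : Int) (actual_num_seqs : Int), Dom_get_decode_heavy_example max_num_tokens max_model_len actual_num_seqs → Pre_get_decode_heavy_example max_num_tokens max_model_len actual_num_seqs → Spec_get_decode_heavy_example max_num_tokens max_model_len actual_num_seqs (get_decode_heavy_example max_num_tokens max_model_len actual_num_seqs)

-- ===== LEMMAS AND PROOFS =====

-- A's cu_q_lens (either branch) is range(n) ++ [max_num_tokens].
theorem cu_closed (mt n : Int) (hn : 1 ≤ n) :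
    (if n = 1 then ([0, mt] : List Int)
     else PySem.List.pyRange 0 n 1 ++
       [PySem.List.pyGetD (PySem.List.pyRange 0 n 1) (-1) 0 + (mt - (n - 1))]) =
    PySem.List.pyRange 0 n 1 ++ [mt] := by
  split_ifs with h1
  · subst h1
    have h2 : PySem.List.pyRange 0 1 1 = [0] := by
      simpa using PySem.List.pyRange_one_singleton 0
    rw [h2]
    rfl
  · have hsplit : PySem.List.pyRange 0 n 1 =
        PySem.List.pyRange 0 (n - 1) 1 ++ [n - 1] := by
      have := PySem.List.pyRange_one_succ_right (a := 0) (b := n - 1) (by omega)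
      simpa [show n - 1 + 1 = n by ring] using this
    rw [hsplit, PySem.List.pyGetD_neg_one_append_singleton]
    congr 2
    ring

-- The kv_lens loop, as a map over range(n), for any cu that is the identity below n and mt at n.
theorem kv_map (mt ml n : Int) (hn : 1 ≤ n) (cu : List Int)
    (hlt : ∀ i : Int, 0 ≤ i → i < n → PySem.List.pyGetD cu i 0 = i)
    (hgn : PySem.List.pyGetD cu n 0 = mt) :
    (PySem.List.pyRange 0 n 1).map (fun i =>
      let q_len := PySem.List.pyGetD cu (i + 1) 0 - PySem.List.pyGetD cu i 0
      if q_len = 1 then ml else q_len) =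
    PySem.List.pyRepeat [ml] (n - 1) ++
      [if mt - (n - 1) = 1 then ml else mt - (n - 1)] := by
  have hsplit : PySem.List.pyRange 0 n 1 =
      PySem.List.pyRange 0 (n - 1) 1 ++ [n - 1] := by
    have := PySem.List.pyRange_one_succ_right (a := 0) (b := n - 1) (by omega)
    simpa [show n - 1 + 1 = n by ring] using this
  rw [hsplit, List.map_append]
  congr 1
  · rw [PySem.List.pyRepeat_singleton]
    refine List.eq_replicate_iff.mpr ⟨?_, ?_⟩
    · simpa using PySem.List.length_pyRange_one (a := 0) (b := n - 1)
    · intro b hb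
      simp only [List.mem_map] at hb
      obtain ⟨i, hi, rfl⟩ := hb
      rw [PySem.List.mem_pyRange_one] at hi
      rw [hlt (i + 1) (by omega) (by omega), hlt i (by omega) (by omega)]
      have h1 : i + 1 - i = (1 : Int) := by ring
      rw [h1]
      simp
  · simp only [List.map_cons, List.map_nil]
    rw [show n - 1 + 1 = n by ring, hgn, hlt (n - 1) (by omega) (by omega)]

theorem verdict (mt ml n : Int) (hn : 1 ≤ n) :
    get_decode_heavy_example mt ml n = get_decode_heavy_example_alt mt ml n := by
  have hlen : (PySem.List.pyRange 0 n 1).length = n.toNat := by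
    simpa using PySem.List.length_pyRange_one (a := 0) (b := n)
  have hlt : ∀ i : Int, 0 ≤ i → i < n →
      PySem.List.pyGetD (PySem.List.pyRange 0 n 1 ++ [mt]) i 0 = i := by
    intro i h0 hi
    rw [PySem.List.pyGetD_eq_getElem (PySem.List.pyRange 0 n 1 ++ [mt]) 0 h0
      (by simp only [List.length_append, List.length_cons, List.length_nil, hlen]; omega)]
    rw [List.getElem_append_left (by omega)]
    rw [PySem.List.getElem_pyRange_one]
    omega
  have hgn : PySem.List.pyGetD (PySem.List.pyRange 0 n 1 ++ [mt]) n 0 = mt := by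
    rw [PySem.List.pyGetD_eq_getElem (PySem.List.pyRange 0 n 1 ++ [mt]) 0 (by omega)
      (by simp only [List.length_append, List.length_cons, List.length_nil, hlen]; omega)]
    rw [List.getElem_append_right (by omega)]
    simp [hlen]
  have hbody : (fun (acc : List Int) (i : Int) =>
      let q_len := PySem.List.pyGetD (PySem.List.pyRange 0 n 1 ++ [mt]) (i + 1) 0 -
        PySem.List.pyGetD (PySem.List.pyRange 0 n 1 ++ [mt]) i 0
      if q_len = 1 then acc ++ [ml] else acc ++ [q_len]) =
      (fun acc i => acc ++
        [(fun i => let q_len := PySem.List.pyGetD (PySem.List.pyRange 0 n 1 ++ [mt]) (i + 1) 0 -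
            PySem.List.pyGetD (PySem.List.pyRange 0 n 1 ++ [mt]) i 0
          if q_len = 1 then ml else q_len) i]) := by
    funext acc i
    simp only
    split_ifs <;> rfl
  unfold get_decode_heavy_example get_decode_heavy_example_alt
  simp only
  rw [cu_closed mt n hn, hbody, PySem.List.foldl_append_singleton_eq_map, List.nil_append,
    kv_map mt ml n hn _ hlt hgn]

-- ===== VERDICT (by name: the statement is the Claim_ definition above) =====
theorem get_decode_heavy_example_spec : Claim_equal_get_decode_heavy_example := by
  intro mt ml n _ hpre
  exact verdict mt ml n hpre.1
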